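-- pv_equiv track=rewrite | github.com/sluglife1414-ux/Court_reporting_demo | build_cr_review.py | extract_review_notes
-- ===== SOURCE A (Python) =====
-- def extract_review_notes(line):
--     """Extract all [REVIEW: ...] note texts from a line.
--
--     Uses a depth counter instead of a regex so nested brackets like
--     [REVIEW: "Bracketing '[REVIEW]' is fine"] don't truncate the note early.
--     """
--     notes = []
--     i = 0
--     while i < len(line):
--         idx = line.find('[REVIEW:', i)
--         if idx == -1:
--             break
--         j = idx + 8           # skip past '[REVIEW:'
--         depth = 1             # we are inside one '[...'
--         while j < len(line) and depth > 0:
--             if line[j] == '[':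
--                 depth += 1
--             elif line[j] == ']':
--                 depth -= 1
--             if depth > 0:
--                 j += 1
--         notes.append(line[idx + 8:j].strip())
--         i = j + 1
--     return notes
-- ===== SOURCE B (Python) =====
-- def extract_review_notes(line):
--     """Single flat left-to-right pass with a mode flag and a character buffer:
--     no str.find, no index slicing."""
--     notes = []
--     buf = None          # None = outside any note; list of chars = inside
--     depth = 0
--     i = 0
--     n = len(line)
--     while i < n:
--         if buf is None:
--             if line.startswith('[REVIEW:', i):
--                 buf = []
--                 depth = 1
--                 i += 8
--             else:
--                 i += 1
--         else:
--             c = line[i]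
--             if c == '[':
--                 depth += 1
--                 buf.append(c)
--             elif c == ']':
--                 depth -= 1
--                 if depth == 0:
--                     notes.append(''.join(buf).strip())
--                     buf = None
--                 else:
--                     buf.append(c)
--             else:
--                 buf.append(c)
--             i += 1
--     if buf is not None:
--         notes.append(''.join(buf).strip())
--     return notes
-- ===== Notes on version B (the rewrite author's own statement) =====
-- stated objective: alternative
-- what changed: Replaced the outer str.find loop with an inner index-rescanning depth loop and index slicing by a single flat left-to-right pass over the characters with a mode flag and an explicit character buffer (no find, no slicing).
import Mathlib
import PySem

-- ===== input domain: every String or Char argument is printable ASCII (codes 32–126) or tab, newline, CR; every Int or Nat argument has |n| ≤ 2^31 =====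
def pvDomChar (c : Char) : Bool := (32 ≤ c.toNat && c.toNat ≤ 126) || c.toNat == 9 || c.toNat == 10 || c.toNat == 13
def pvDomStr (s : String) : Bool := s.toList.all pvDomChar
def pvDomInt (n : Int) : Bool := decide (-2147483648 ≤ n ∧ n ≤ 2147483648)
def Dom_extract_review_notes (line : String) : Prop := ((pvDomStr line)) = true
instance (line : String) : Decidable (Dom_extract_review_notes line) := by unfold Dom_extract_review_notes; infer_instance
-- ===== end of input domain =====

-- B replaces A's find-then-rescan structure by one flat pass with a mode flag and a
-- character buffer; same cost, different decomposition (objective: alternative).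

-- ===== PORT A =====
-- the literal '[REVIEW:' marker
def pvMarker : List Char := ['[', 'R', 'E', 'V', 'I', 'E', 'W', ':']

-- line.find('[REVIEW:', i): A only ever uses idx+8 onward, so the search is ported as
-- "suffix after the first occurrence of the marker" (the loop index i is the dropped prefix)
def pvFindAfter : List Char → Option (List Char)
  | [] => none
  | c :: cs => if pvMarker.isPrefixOf (c :: cs) then some ((c :: cs).drop 8) else pvFindAfter cs

-- A's inner while loop: j advances with the depth counter; returns (line[idx+8:j], rest after j)
def pvScanA : List Char → Nat → List Char × List Char
  | [], _ => ([], [])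
  | c :: cs, d =>
    let d' := if c = '[' then d + 1 else if c = ']' then d - 1 else d
    if d' = 0 then ([], cs)
    else
      let p := pvScanA cs d'
      (c :: p.1, p.2)

theorem pvScanA_snd_le (cs : List Char) (d : Nat) : (pvScanA cs d).2.length ≤ cs.length := by
  induction cs generalizing d with
  | nil => simp [pvScanA]
  | cons c cs ih =>
    have key : ∀ n : Nat, ((if n = 0 then (([] : List Char), cs)
        else (c :: (pvScanA cs n).1, (pvScanA cs n).2)).2).length ≤ cs.length + 1 := by
      intro n
      split
      · simp
      · exact Nat.le_succ_of_le (ih n)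
    exact key _

theorem pvFindAfter_lt (cs r : List Char) (h : pvFindAfter cs = some r) : r.length < cs.length := by
  induction cs with
  | nil => simp [pvFindAfter] at h
  | cons c cs ih =>
    simp only [pvFindAfter] at h
    split at h
    · cases h; simp
    · exact Nat.lt_succ_of_lt (ih h)

-- A's outer while loop over the remaining suffix
def pvLoopA (cs : List Char) : List String :=
  match hfa : pvFindAfter cs with
  | none => []
  | some rest =>
    let p := pvScanA rest 1
    String.ofList (PySem.Chars.strip p.1) :: pvLoopA p.2
termination_by cs.length
decreasing_by
  exact Nat.lt_of_le_of_lt (pvScanA_snd_le rest 1) (pvFindAfter_lt cs rest hfa)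

def extract_review_notes (line : String) : List String := pvLoopA line.toList

-- ===== PORT B =====
-- Source B's single pass: pvGoOut = the 'buf is None' arm, pvGoIn = the in-note arm
-- (buf is kept reversed, the Lean idiom for Python's list append)
mutual
def pvGoOut : List Char → List String
  | [] => []
  | c :: cs =>
    if pvMarker.isPrefixOf (c :: cs) then pvGoIn ((c :: cs).drop 8) 1 []
    else pvGoOut cs
termination_by cs => cs.length
decreasing_by all_goals (simp; try omega)

def pvGoIn : List Char → Nat → List Char → List String
  | [], _, buf => [String.ofList (PySem.Chars.strip buf.reverse)]
  | c :: cs, d, buf =>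
    if c = '[' then pvGoIn cs (d + 1) (c :: buf)
    else if c = ']' then
      if d = 1 then String.ofList (PySem.Chars.strip buf.reverse) :: pvGoOut cs
      else pvGoIn cs (d - 1) (c :: buf)
    else pvGoIn cs d (c :: buf)
termination_by cs _ _ => cs.length
decreasing_by all_goals simp
end

def extract_review_notes_alt (line : String) : List String := pvGoOut line.toList

-- ===== PRECONDITION & SPEC =====
def Spec_extract_review_notes (line : String) (out : List String) : Prop := out = extract_review_notes_alt line
instance (line : String) (out : List String) : Decidable (Spec_extract_review_notes line out) := by unfold Spec_extract_review_notes; infer_instance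

-- ===== CLAIM (what is proved, stated in full; the proofs are below) =====
def Claim_equal_extract_review_notes : Prop := ∀ (line : String), Dom_extract_review_notes line → Spec_extract_review_notes line (extract_review_notes line)

-- ===== LEMMAS AND PROOFS =====

-- the in-note arm of B computes exactly A's inner scan, with the buffer prepended
theorem pvGoIn_eq_scan (cs : List Char) (d : Nat) (buf : List Char) (hd : 1 ≤ d) :
    pvGoIn cs d buf =
      String.ofList (PySem.Chars.strip (buf.reverse ++ (pvScanA cs d).1)) :: pvGoOut (pvScanA cs d).2 := by
  induction cs generalizing d buf with
  | nil => simp [pvGoIn, pvScanA, pvGoOut]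
  | cons c cs ih =>
    by_cases hb : c = '['
    · rw [pvGoIn]
      simp only [hb, pvScanA]
      have : ¬ (d + 1 = 0) := by omega
      simp only [ih (d + 1) ('[' :: buf) (by omega)]
      simp
    · by_cases hc : c = ']'
      · by_cases h1 : d = 1
        · subst h1; subst hc
          rw [pvGoIn]
          simp [pvScanA]
        · subst hc
          rw [pvGoIn]
          simp only [if_neg hb, if_neg h1, pvScanA]
          have hne : ¬ (']' = '[') := by decide
          have : ¬ (d - 1 = 0) := by omega
          simp only [ih (d - 1) (']' :: buf) (by omega)]
          simp [this]
      · rw [pvGoIn]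
        simp only [if_neg hb, if_neg hc, pvScanA]
        have : ¬ (d = 0) := by omega
        simp only [this, ih d (c :: buf) hd]
        simp

-- B's out-of-note arm is A's find
theorem pvGoOut_eq_find (cs : List Char) :
    pvGoOut cs = match pvFindAfter cs with
      | none => []
      | some rest => pvGoIn rest 1 [] := by
  induction cs with
  | nil => simp [pvGoOut, pvFindAfter]
  | cons c cs ih =>
    rw [pvGoOut, pvFindAfter]
    split
    · rfl
    · exact ih

theorem pvLoopA_none (cs : List Char) (h : pvFindAfter cs = none) : pvLoopA cs = [] := by
  rw [pvLoopA]
  split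
  · rfl
  · rename_i rest h'; rw [h] at h'; cases h'

theorem pvLoopA_some (cs rest : List Char) (h : pvFindAfter cs = some rest) :
    pvLoopA cs = String.ofList (PySem.Chars.strip (pvScanA rest 1).1) :: pvLoopA (pvScanA rest 1).2 := by
  rw [pvLoopA]
  split
  · rename_i h'; rw [h] at h'; cases h'
  · rename_i rest' h'; rw [h] at h'; cases h'; rfl

theorem pvGoOut_eq_loopA (cs : List Char) : pvGoOut cs = pvLoopA cs := by
  induction hn : cs.length using Nat.strong_induction_on generalizing cs with
  | _ n ih =>
    subst hn
    rw [pvGoOut_eq_find]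
    cases h : pvFindAfter cs with
    | none => rw [pvLoopA_none cs h]
    | some rest =>
      rw [pvLoopA_some cs rest h]
      show pvGoIn rest 1 [] = _
      rw [pvGoIn_eq_scan rest 1 [] (by omega)]
      simp only [List.reverse_nil, List.nil_append]
      congr 1
      exact ih _ (Nat.lt_of_le_of_lt (pvScanA_snd_le rest 1) (pvFindAfter_lt cs rest h)) _ rfl

-- ===== VERDICT (by name: the statement is the Claim_ definition above) =====
theorem extract_review_notes_spec : Claim_equal_extract_review_notes := by
  intro line _
  unfold Spec_extract_review_notes extract_review_notes extract_review_notes_alt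
  exact (pvGoOut_eq_loopA line.toList).symm
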